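-- pv_equiv track=rewrite | github.com/JoHandzz/AOC-2023 | 2-1.py | get_valid_game_id_pythonic
-- ===== SOURCE A (Python) =====
-- MAX_CUBES = {'red': 12, 'green': 13, 'blue': 14}
--
-- def get_valid_game_id_pythonic(line):
--     """Checks if a game is valid using a generator and all()."""
--
--     try:
--         game_prefix, all_samples_str = line.split(':')
--         game_id = int(game_prefix.split(' ')[-1])
--
--         # This is a nested generator expression.
--         # It yields (num_str, color) tuples for every single pull in the game
--         # without building big lists in memory.
--         all_pulls = (
--             pull.strip().split(' ')
--             for sample_str in all_samples_str.split(';')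
--             for pull in sample_str.split(',')
--         )
--
--
--         # all() checks if every item in the generator is True.
--         # It stops and returns False as soon as it finds one invalid pull.
--         is_valid = all(
--             int(num_str) <= MAX_CUBES.get(color, 0)
--             for num_str, color in all_pulls
--         )
--
--         return game_id if is_valid else 0
--
--     except (ValueError, AttributeError):
--         return 0
-- ===== SOURCE B (Python) =====
-- MAX_CUBES = {'red': 12, 'green': 13, 'blue': 14}
--
-- def get_valid_game_id_pythonic(line):
--     """Builds a running max-per-color table, then checks the totals per color."""
--     try:
--         game_prefix, all_samples_str = line.split(':')
--         game_id = int(game_prefix.split(' ')[-1])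
--
--         maxes = {}
--         for sample_str in all_samples_str.split(';'):
--             for pull in sample_str.split(','):
--                 num_str, color = pull.strip().split(' ')
--                 maxes[color] = max(maxes.get(color, 0), int(num_str))
--
--         if all(count <= MAX_CUBES.get(color, 0) for color, count in maxes.items()):
--             return game_id
--         return 0
--     except (ValueError, AttributeError):
--         return 0
-- ===== Notes on version B (the rewrite author's own statement) =====
-- stated objective: alternative
-- what changed: A streams a short-circuiting all() predicate over every pull; B instead builds a running max-per-color table in one pass over the pulls and then validates the table against MAX_CUBES in a separate pass over colors.
import Mathlib
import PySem

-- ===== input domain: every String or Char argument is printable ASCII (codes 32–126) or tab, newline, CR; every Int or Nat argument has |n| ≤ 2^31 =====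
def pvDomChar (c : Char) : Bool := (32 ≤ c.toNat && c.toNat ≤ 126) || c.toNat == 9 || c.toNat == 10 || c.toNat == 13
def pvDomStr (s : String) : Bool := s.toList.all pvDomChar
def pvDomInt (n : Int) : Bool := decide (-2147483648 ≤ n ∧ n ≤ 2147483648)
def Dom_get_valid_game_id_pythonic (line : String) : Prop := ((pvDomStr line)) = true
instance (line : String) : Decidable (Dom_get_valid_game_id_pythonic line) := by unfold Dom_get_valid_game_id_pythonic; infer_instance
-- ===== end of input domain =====

-- B replaces A's short-circuiting all() over a stream of per-pull checks by a running
-- max-per-color table built in one pass and a final per-color comparison (objective: alternative).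

-- ===== PORT A =====
def pvMaxCubes : PySem.Dict String Int :=
  PySem.Dict.ofList [("red", 12), ("green", 13), ("blue", 14)]

-- s.split(sep) for the nonempty literal separators used here (split? is none only for sep = "")
def pvSplit (s sep : String) : List String :=
  (PySem.Str.split? s sep).getD []

-- the all(...) generator of A, consumed lazily: `none` = a ValueError raised while consuming
def pvAllValid : List String → Option Bool
  | [] => some true
  | pull :: rest =>
    match pvSplit (PySem.Str.strip pull) " " with
    | [numStr, color] =>
      match PySem.Int.ofStr? numStr with
      | some n =>
        if n ≤ pvMaxCubes.getD color 0 then pvAllValid rest else some false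
      | none => none
    | _ => none

def get_valid_game_id_pythonic (line : String) : Int :=
  match pvSplit line ":" with
  | [gamePrefix, allSamplesStr] =>
    match PySem.List.pyGet? (pvSplit gamePrefix " ") (-1) with
    | none => 0  -- unreachable: str.split(sep) never returns an empty list
    | some lastTok =>
      match PySem.Int.ofStr? lastTok with
      | none => 0  -- ValueError from int(...)
      | some gameId =>
        -- the nested generator expression, flattened in the same order
        let allPulls :=
          (pvSplit allSamplesStr ";").flatMap (fun sampleStr => pvSplit sampleStr ",")
        match pvAllValid allPulls with
        | some true => gameId
        | some false => 0
        | none => 0   -- ValueError while consuming the generator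
  | _ => 0  -- ValueError from unpacking line.split(':')

-- ===== PORT B =====
-- one iteration of B's inner loop body: update the running max for the pull's color
-- (none = ValueError; once raised, it propagates through the rest of the fold)
def pvStep (maxes : PySem.Dict String Int) (pull : String) :
    Option (PySem.Dict String Int) :=
  match pvSplit (PySem.Str.strip pull) " " with
  | [numStr, color] =>
    (PySem.Int.ofStr? numStr).map
      (fun n => maxes.insert color (max (maxes.getD color 0) n))
  | _ => none

def get_valid_game_id_pythonic_alt (line : String) : Int :=
  match pvSplit line ":" with
  | [gamePrefix, allSamplesStr] =>
    match PySem.List.pyGet? (pvSplit gamePrefix " ") (-1) with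
    | none => 0  -- unreachable: str.split(sep) never returns an empty list
    | some lastTok =>
      match PySem.Int.ofStr? lastTok with
      | none => 0  -- ValueError from int(...)
      | some gameId =>
        -- the two nested for-loops building the max-per-color table
        let maxes? :=
          (pvSplit allSamplesStr ";").foldl
            (fun acc sampleStr =>
              (pvSplit sampleStr ",").foldl
                (fun acc2 pull => acc2.bind (fun d => pvStep d pull)) acc)
            (some PySem.Dict.empty)
        match maxes? with
        | none => 0  -- ValueError inside the loops
        | some maxes =>
          if maxes.items.all (fun e => e.2 ≤ pvMaxCubes.getD e.1 0)
          then gameId else 0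
  | _ => 0  -- ValueError from unpacking line.split(':')

-- ===== PRECONDITION & SPEC =====
def Spec_get_valid_game_id_pythonic (line : String) (out : Int) : Prop := out = get_valid_game_id_pythonic_alt line
instance (line : String) (out : Int) : Decidable (Spec_get_valid_game_id_pythonic line out) := by unfold Spec_get_valid_game_id_pythonic; infer_instance

-- ===== CLAIM (what is proved, stated in full; the proofs are below) =====
def Claim_equal_get_valid_game_id_pythonic : Prop := ∀ (line : String), Dom_get_valid_game_id_pythonic line → Spec_get_valid_game_id_pythonic line (get_valid_game_id_pythonic line)

-- ===== LEMMAS AND PROOFS =====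

-- the per-color limit is never negative
lemma pvLim_nonneg (c : String) : 0 ≤ pvMaxCubes.getD c 0 := by
  have h : pvMaxCubes = PySem.Dict.mk [("red", 12), ("green", 13), ("blue", 14)] := by decide
  rw [h, PySem.Dict.getD_eq_get?_getD]
  simp only [PySem.Dict.get?_mk_cons]
  split_ifs <;> norm_num
  exact PySem.Dict.get?_empty c ▸ le_refl 0

-- what B's final pass checks, as a proposition over the keys of the table
def pvChk (d : PySem.Dict String Int) : Prop :=
  ∀ k ∈ d.keys, d.getD k 0 ≤ pvMaxCubes.getD k 0

lemma pvChk_bool (d : PySem.Dict String Int) (hnd : d.keys.Nodup) :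
    ((d.items.all (fun e => e.2 ≤ pvMaxCubes.getD e.1 0)) = true) ↔ pvChk d := by
  rw [PySem.Dict.items_eq_map_keys d hnd 0]
  simp [pvChk, List.all_map, List.all_eq_true]

-- inserting the running max for one pull keeps the check iff the pull itself passes
lemma pvChk_insert (d : PySem.Dict String Int) (color : String) (n : Int) :
    pvChk (d.insert color (max (d.getD color 0) n)) ↔
      n ≤ pvMaxCubes.getD color 0 ∧ pvChk d := by
  constructor
  · intro h
    have hc := h color ((PySem.Dict.mem_keys_insert d color color _).mpr (Or.inl rfl))
    rw [PySem.Dict.getD_insert_self] at hc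
    refine ⟨le_trans (le_max_right _ _) hc, ?_⟩
    intro k hk
    by_cases hkc : k = color
    · subst hkc
      exact le_trans (le_max_left _ _) hc
    · have := h k ((PySem.Dict.mem_keys_insert d color k _).mpr (Or.inr hk))
      rwa [PySem.Dict.getD_insert_of_ne d _ _ hkc] at this
  · rintro ⟨hn, hd⟩
    intro k hk
    rw [PySem.Dict.mem_keys_insert] at hk
    by_cases hkc : k = color
    · subst hkc
      rw [PySem.Dict.getD_insert_self]
      refine max_le ?_ hn
      by_cases hm : k ∈ d.keys
      · exact hd k hm
      · rw [PySem.Dict.getD_of_not_contains]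
        · exact pvLim_nonneg k
        · rw [← Bool.not_eq_true, PySem.Dict.contains_iff_mem_keys]; exact hm
    · rcases hk with hk | hk
      · exact absurd hk hkc
      · rw [PySem.Dict.getD_insert_of_ne d _ _ hkc]
        exact hd k hk

-- a raised ValueError propagates to the end of the fold
lemma pvFold_none (ps : List String) :
    ps.foldl (fun acc2 pull => acc2.bind (fun d => pvStep d pull)) none = none := by
  induction ps with
  | nil => rfl
  | cons p rest ih => rw [List.foldl_cons, Option.bind_none]; exact ih

-- B's running-max loop over the flattened pull list agrees with A's short-circuiting all()
lemma pvMain (ps : List String) : ∀ (d : PySem.Dict String Int), d.keys.Nodup →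
    ((match ps.foldl (fun acc2 pull => acc2.bind (fun d => pvStep d pull)) (some d) with
      | some d' => pvChk d'
      | none => False)
     ↔
     (match pvAllValid ps with
      | some true => pvChk d
      | _ => False)) := by
  induction ps with
  | nil => intro d _; exact Iff.rfl
  | cons p rest ih =>
    intro d hnd
    rw [List.foldl_cons, Option.bind_some]
    cases hsp : pvSplit (PySem.Str.strip p) " " with
    | nil =>
      rw [show pvStep d p = none from by unfold pvStep; rw [hsp], pvFold_none,
          show pvAllValid (p :: rest) = none from by unfold pvAllValid; rw [hsp]]
    | cons t1 ts =>
      cases ts with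
      | nil =>
        rw [show pvStep d p = none from by unfold pvStep; rw [hsp], pvFold_none,
            show pvAllValid (p :: rest) = none from by unfold pvAllValid; rw [hsp]]
      | cons t2 ts2 =>
        cases ts2 with
        | cons _ _ =>
          rw [show pvStep d p = none from by unfold pvStep; rw [hsp], pvFold_none,
              show pvAllValid (p :: rest) = none from by unfold pvAllValid; rw [hsp]]
        | nil =>
          cases hn : PySem.Int.ofStr? t1 with
          | none =>
            rw [show pvStep d p = none from by unfold pvStep; rw [hsp]; dsimp only; rw [hn]; rfl,
                pvFold_none,
                show pvAllValid (p :: rest) = none from by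
                  unfold pvAllValid; rw [hsp]; dsimp only; rw [hn]]
          | some n =>
            rw [show pvStep d p = some (d.insert t2 (max (d.getD t2 0) n)) from by
                  unfold pvStep; rw [hsp]; dsimp only; rw [hn]; rfl,
                ih _ (PySem.Dict.nodup_keys_insert d t2 _ hnd),
                show pvAllValid (p :: rest)
                    = (if n ≤ pvMaxCubes.getD t2 0 then pvAllValid rest else some false) from by
                  conv_lhs => unfold pvAllValid
                  rw [hsp]; dsimp only; rw [hn]]
            by_cases hle : n ≤ pvMaxCubes.getD t2 0
            · rw [if_pos hle]
              cases pvAllValid rest with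
              | none => exact Iff.rfl
              | some b =>
                cases b with
                | false => exact Iff.rfl
                | true =>
                  dsimp only
                  rw [pvChk_insert]
                  exact ⟨fun h => h.2, fun h => ⟨hle, h⟩⟩
            · rw [if_neg hle]
              cases pvAllValid rest with
              | none => exact Iff.rfl
              | some b =>
                cases b with
                | false => exact Iff.rfl
                | true =>
                  dsimp only
                  constructor
                  · intro h; exact hle ((pvChk_insert d t2 n).mp h).1
                  · intro h; exact h.elim

-- the two nested for-loops of B are the single loop over the flattened pull list
lemma pvFoldl_flatMap (samples : List String) :
    ∀ (acc : Option (PySem.Dict String Int)),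
      samples.foldl
          (fun acc sampleStr =>
            (pvSplit sampleStr ",").foldl
              (fun acc2 pull => acc2.bind (fun d => pvStep d pull)) acc)
          acc
        = (samples.flatMap (fun s => pvSplit s ",")).foldl
            (fun acc2 pull => acc2.bind (fun d => pvStep d pull)) acc := by
  induction samples with
  | nil => intro acc; rfl
  | cons s rest ih =>
    intro acc
    rw [List.foldl_cons, List.flatMap_cons, List.foldl_append]
    exact ih _

-- one successful step keeps the keys of the table distinct
lemma pvStep_nodup (d d2 : PySem.Dict String Int) (p : String)
    (h : pvStep d p = some d2) (hnd : d.keys.Nodup) : d2.keys.Nodup := by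
  unfold pvStep at h
  cases hsp : pvSplit (PySem.Str.strip p) " " with
  | nil => rw [hsp] at h; simp at h
  | cons t1 ts =>
    cases ts with
    | nil => rw [hsp] at h; simp at h
    | cons t2 ts2 =>
      cases ts2 with
      | cons _ _ => rw [hsp] at h; simp at h
      | nil =>
        rw [hsp] at h
        dsimp only at h
        cases hn : PySem.Int.ofStr? t1 with
        | none => rw [hn] at h; simp at h
        | some n =>
          rw [hn] at h
          simp only [Option.map_some, Option.some.injEq] at h
          rw [← h]
          exact PySem.Dict.nodup_keys_insert d t2 _ hnd

-- the fold over pvStep keeps the keys of the table distinct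
lemma pvNodup_fold (ps : List String) : ∀ (acc : Option (PySem.Dict String Int))
    (d' : PySem.Dict String Int),
    ps.foldl (fun acc2 pull => acc2.bind (fun d => pvStep d pull)) acc = some d' →
    (∀ d, acc = some d → d.keys.Nodup) → d'.keys.Nodup := by
  induction ps with
  | nil => intro acc d' h hacc; exact hacc d' h
  | cons p rest ih =>
    intro acc d' h hacc
    rw [List.foldl_cons] at h
    refine ih _ d' h ?_
    intro d2 h2
    cases acc with
    | none => rw [Option.bind_none] at h2; exact absurd h2 (by simp)
    | some d =>
      rw [Option.bind_some] at h2
      exact pvStep_nodup d d2 p h2 (hacc d rfl)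

-- ===== VERDICT (by name: the statement is the Claim_ definition above) =====
theorem get_valid_game_id_pythonic_spec : Claim_equal_get_valid_game_id_pythonic := by
  intro line _
  unfold Spec_get_valid_game_id_pythonic get_valid_game_id_pythonic get_valid_game_id_pythonic_alt
  cases hsp : pvSplit line ":" with
  | nil => rfl
  | cons a ts =>
    cases ts with
    | nil => rfl
    | cons b ts2 =>
      cases ts2 with
      | cons _ _ => rfl
      | nil =>
        dsimp only
        cases hget : PySem.List.pyGet? (pvSplit a " ") (-1) with
        | none => rfl
        | some lastTok =>
          dsimp only
          cases hid : PySem.Int.ofStr? lastTok with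
          | none => rfl
          | some gameId =>
            dsimp only
            rw [pvFoldl_flatMap]
            have hchk0 : pvChk PySem.Dict.empty := by
              intro k hk; rw [PySem.Dict.keys_empty] at hk; exact absurd hk (List.not_mem_nil)
            have hmain := pvMain ((pvSplit b ";").flatMap (fun s => pvSplit s ","))
              PySem.Dict.empty PySem.Dict.nodup_keys_empty
            cases hfold : List.foldl (fun acc2 pull => acc2.bind (fun d => pvStep d pull))
                (some PySem.Dict.empty) ((pvSplit b ";").flatMap (fun s => pvSplit s ",")) with
            | none =>
              rw [hfold] at hmain
              cases hall : pvAllValid ((pvSplit b ";").flatMap (fun s => pvSplit s ",")) with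
              | none => rfl
              | some v =>
                cases v with
                | false => rfl
                | true =>
                  rw [hall] at hmain
                  exact absurd (hmain.mpr hchk0) (fun h => h)
            | some d' =>
              rw [hfold] at hmain
              have hnd' : d'.keys.Nodup :=
                pvNodup_fold _ _ d' hfold (fun d h => Option.some.inj h ▸ PySem.Dict.nodup_keys_empty)
              cases hall : pvAllValid ((pvSplit b ";").flatMap (fun s => pvSplit s ",")) with
              | none =>
                rw [hall] at hmain
                dsimp only at hmain ⊢
                have hnc : ¬ pvChk d' := fun h => hmain.mp h
                rw [if_neg (fun hb => hnc ((pvChk_bool d' hnd').mp hb))]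
              | some v =>
                cases v with
                | false =>
                  rw [hall] at hmain
                  dsimp only at hmain ⊢
                  have hnc : ¬ pvChk d' := fun h => hmain.mp h
                  rw [if_neg (fun hb => hnc ((pvChk_bool d' hnd').mp hb))]
                | true =>
                  rw [hall] at hmain
                  dsimp only at hmain ⊢
                  rw [if_pos ((pvChk_bool d' hnd').mpr (hmain.mpr hchk0))]
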